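-- pv_equiv track=rewrite | github.com/Chajmer/advent_of_code | aoc_24/15/aoc_24_15_2.py | vertical_move
-- ===== SOURCE A (Python) =====
-- def vertical_move(grid, x, y, d):
--     new_y = y
--     moving_layers = [{(x, y)}]
--
--     while moving_layers[-1]:
--         new_y += d
--         next_layer = set()
--
--         for xi, yi in moving_layers[-1]:
--             # obstacle detected
--             if grid[yi + d][xi] == '#':
--                 return x, y
--             # save for later box shifting
--             if grid[yi + d][xi] != '.':
--                 next_layer.add((xi, yi + d))
--                 if grid[yi + d][xi] == '[':
--                     next_layer.add((xi + 1, yi + d))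
--                 else:
--                     next_layer.add((xi - 1, yi + d))
--         moving_layers.append(next_layer)
--
--     # shift boxes
--     for layer in reversed(moving_layers[:-1]):
--         for xi, yi in layer:
--             grid[yi + d][xi] = grid[yi][xi]
--             grid[yi][xi] = '.'
--
--     return x, y + d
-- ===== SOURCE B (Python) =====
-- def vertical_move(grid, x, y, d):
--     # Recursive collector over column-sets (one set of x-columns per row) instead of
--     # A's iterative list of layers of (x, y) pairs; same in-place box shifting on success.
--     def climb(yi, cols):
--         # layers of (row, columns) to shift, or None if a wall blocks the push
--         if not cols:
--             return []
--         row = grid[yi + d]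
--         if any(row[c] == '#' for c in cols):
--             return None
--         nxt = {c + s
--                for c in cols if row[c] != '.'
--                for s in ((0, 1) if row[c] == '[' else (0, -1))}
--         rest = climb(yi + d, nxt)
--         return None if rest is None else [(yi, cols)] + rest
--
--     layers = climb(y, {x})
--     if layers is None:
--         return x, y
--     for ry, rcols in reversed(layers):
--         for c in rcols:
--             grid[ry + d][c] = grid[ry][c]
--             grid[ry][c] = '.'
--     return x, y + d
-- ===== Notes on version B (the rewrite author's own statement) =====
-- stated objective: alternative
-- what changed: Replaces A's iterative while-loop over a growing list of layers of (x,y)-pair sets (with interleaved wall checks and duplicate re-adds) by a recursive climb over sets of x-columns paired with a single row counter, checking walls in a separate any() pass and building each next column set with one set comprehension.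
-- outside the precondition, e.g. on vertical_move([['[', ']']], 0, 0, 0): A does not finish within the time limit, B raises RecursionError
import Mathlib
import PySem

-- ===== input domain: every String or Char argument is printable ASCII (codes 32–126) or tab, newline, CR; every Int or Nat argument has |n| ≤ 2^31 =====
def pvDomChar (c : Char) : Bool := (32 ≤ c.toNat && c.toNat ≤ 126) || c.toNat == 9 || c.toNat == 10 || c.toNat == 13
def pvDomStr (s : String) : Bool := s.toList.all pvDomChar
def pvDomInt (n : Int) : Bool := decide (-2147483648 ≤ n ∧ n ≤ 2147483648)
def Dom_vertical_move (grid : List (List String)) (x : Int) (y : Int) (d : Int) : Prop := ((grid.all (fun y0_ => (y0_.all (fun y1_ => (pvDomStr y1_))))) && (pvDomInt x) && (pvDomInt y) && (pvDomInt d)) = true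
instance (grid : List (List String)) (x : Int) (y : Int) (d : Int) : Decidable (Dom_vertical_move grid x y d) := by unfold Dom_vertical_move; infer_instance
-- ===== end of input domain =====

-- B replaces A's iterative list of layers of (x,y) pairs by a recursive collector over
-- column-sets (one set of x-columns per row); same return value. Both Pythons shift the
-- boxes in the caller's grid in place; that mutation is identical in A and B but is not
-- modeled here — the theorems are about the RETURN value only.

-- ===== PORT A =====
-- grid[r][c] as an Option (none = IndexError, excluded by Pre_)
def pvCellA (grid : List (List String)) (r : Int) (c : Int) : Option String :=
  (PySem.List.pyGet? grid r).bind (fun row => PySem.List.pyGet? row c)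

-- the body of A's `for xi, yi in moving_layers[-1]` loop: builds next_layer, none = hit '#'
def pvStepA (grid : List (List String)) (d : Int) :
    List (Int × Int) → PySem.Set (Int × Int) → Option (PySem.Set (Int × Int))
  | [], acc => some acc
  | p :: rest, acc =>
    let c := pvCellA grid (p.2 + d) p.1
    if c = some "#" then none
    else if c ≠ some "." then
      pvStepA grid d rest
        (PySem.Set.add (PySem.Set.add acc (p.1, p.2 + d))
          (if c = some "[" then (p.1 + 1, p.2 + d) else (p.1 - 1, p.2 + d)))
    else pvStepA grid d rest acc

-- A's while-loop; fuel only makes the recursion structural (grid.length+1 suffices on Pre_ inputs).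
-- Only the current layer is carried: the list of earlier layers drives the in-place box
-- shifting only, which does not affect the return value (see header comment).
def pvLoopA (grid : List (List String)) (x y d : Int) :
    Nat → Int → PySem.Set (Int × Int) → Int × Int
  | 0, _, _ => (x, y)
  | fuel + 1, newY, layer =>
    if layer = ([] : PySem.Set (Int × Int)) then (x, y + d)
    else
      match pvStepA grid d layer PySem.Set.empty with
      | none => (x, y)
      | some next => pvLoopA grid x y d fuel (newY + d) next

def vertical_move (grid : List (List String)) (x : Int) (y : Int) (d : Int) : Int × Int :=
  pvLoopA grid x y d (grid.length + 1) y (PySem.Set.ofList [(x, y)])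

-- ===== PORT B =====
-- the columns contributed by column c to the next row's column set (B's set comprehension body)
def pvEmitB (row : List String) (c : Int) : List Int :=
  if PySem.List.pyGet? row c = some "[" then [c, c + 1]
  else if PySem.List.pyGet? row c ≠ some "." then [c, c - 1]
  else []

-- B's recursive climb; fuel only makes the recursion structural (grid.length+1 suffices on Pre_ inputs).
def pvClimbB (grid : List (List String)) (d : Int) :
    Nat → Int → PySem.Set Int → Option (List (Int × PySem.Set Int))
  | 0, _, _ => none
  | fuel + 1, yi, cols =>
    if cols = ([] : PySem.Set Int) then some []
    else
      match PySem.List.pyGet? grid (yi + d) with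
      | none => none  -- Python raises IndexError here; excluded by Pre_
      | some row =>
        if cols.any (fun c => PySem.List.pyGet? row c = some "#") then none
        else
          match pvClimbB grid d fuel (yi + d) (PySem.Set.ofList (cols.flatMap (pvEmitB row))) with
          | none => none
          | some rest => some ((yi, cols) :: rest)

def vertical_move_alt (grid : List (List String)) (x : Int) (y : Int) (d : Int) : Int × Int :=
  match pvClimbB grid d (grid.length + 1) y (PySem.Set.ofList [x]) with
  | none => (x, y)
  | some _ => (x, y + d)

-- ===== PRECONDITION & SPEC =====
-- grid[r][c] with Python index semantics, for stating Pre_ (not part of either port)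
def pvPeek (grid : List (List String)) (r : Int) (c : Int) : Option String :=
  (PySem.List.pyGet? grid r).bind (fun row => PySem.List.pyGet? row c)

-- Pre_ admits (i) pushes decided by the single cell ahead — grid[y+d][x] readable and a '#'
-- wall, or a '.' free cell with the start cell grid[y][x] readable for the shift — and
-- (ii) the puzzle's well-formed warehouse pushes (d = ±1, rectangular grid over cells
-- "#"/"."/"["/"]", all-'#' top and bottom rows, '[' and ']' properly paired in each row,
-- start strictly inside). On other inputs A can raise IndexError, diverge (d = 0), or return
-- a value depending on set-iteration order or on negative-index wraparound — accidents of
-- its indexing that are excluded here.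
def Pre_vertical_move (grid : List (List String)) (x : Int) (y : Int) (d : Int) : Prop :=
  (pvPeek grid (y + d) x = some "#" ∨
    (pvPeek grid (y + d) x = some "." ∧ pvPeek grid y x ≠ none)) ∨
  (d = 1 ∨ d = -1) ∧
  3 ≤ grid.length ∧
  (∀ row ∈ grid, row.length = (grid.getD 0 []).length) ∧
  (∀ row ∈ grid, ∀ s ∈ row, s = "#" ∨ s = "." ∨ s = "[" ∨ s = "]") ∧
  (∀ s ∈ grid.getD 0 [], s = "#") ∧
  (∀ s ∈ grid.getD (grid.length - 1) [], s = "#") ∧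
  (∀ row ∈ grid, ∀ i < row.length,
      (row.getD i "" = "[" → row.getD (i + 1) "" = "]") ∧
      (row.getD i "" = "]" → 1 ≤ i ∧ row.getD (i - 1) "" = "[")) ∧
  0 ≤ x ∧ x < ((grid.getD 0 []).length : Int) ∧ 1 ≤ y ∧ y ≤ (grid.length : Int) - 2

instance (grid : List (List String)) (x : Int) (y : Int) (d : Int) :
    Decidable (Pre_vertical_move grid x y d) := by unfold Pre_vertical_move; infer_instance

def pvWitness_vertical_move : List (List String) × Int × Int × Int :=
  ([["#", "#", "#", "#"], ["#", "[", "]", "#"], ["#", ".", ".", "#"], ["#", "#", "#", "#"]], 1, 1, 1)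

def Spec_vertical_move (grid : List (List String)) (x : Int) (y : Int) (d : Int) (out : Int × Int) : Prop := out = vertical_move_alt grid x y d
instance (grid : List (List String)) (x : Int) (y : Int) (d : Int) (out : Int × Int) : Decidable (Spec_vertical_move grid x y d out) := by unfold Spec_vertical_move; infer_instance

-- ===== CLAIM (what is proved, stated in full; the proofs are below) =====
def Claim_equal_vertical_move : Prop := ∀ (grid : List (List String)) (x : Int) (y : Int) (d : Int), Dom_vertical_move grid x y d → Pre_vertical_move grid x y d → Spec_vertical_move grid x y d (vertical_move grid x y d)

-- ===== LEMMAS AND PROOFS =====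

-- the cells contributed by layer element p to A's next_layer (proof-side characterization)
def pvEmitA (grid : List (List String)) (d : Int) (p : Int × Int) : List (Int × Int) :=
  if pvCellA grid (p.2 + d) p.1 = some "[" then [(p.1, p.2 + d), (p.1 + 1, p.2 + d)]
  else if pvCellA grid (p.2 + d) p.1 ≠ some "." then [(p.1, p.2 + d), (p.1 - 1, p.2 + d)]
  else []

lemma pvStepA_none_iff (grid : List (List String)) (d : Int) (l : List (Int × Int))
    (acc : PySem.Set (Int × Int)) :
    pvStepA grid d l acc = none ↔ ∃ p ∈ l, pvCellA grid (p.2 + d) p.1 = some "#" := by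
  induction l generalizing acc with
  | nil => simp [pvStepA]
  | cons p rest ih =>
    by_cases h1 : pvCellA grid (p.2 + d) p.1 = some "#"
    · simp [pvStepA, h1]
    · by_cases h2 : pvCellA grid (p.2 + d) p.1 = some "."
      · simp [pvStepA, h2, ih]
      · simp [pvStepA, h1, h2, ih]

lemma pvStepA_some_mem (grid : List (List String)) (d : Int) (l : List (Int × Int))
    (acc L' : PySem.Set (Int × Int)) (h : pvStepA grid d l acc = some L') (q : Int × Int) :
    q ∈ L' ↔ q ∈ acc ∨ ∃ p ∈ l, q ∈ pvEmitA grid d p := by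
  induction l generalizing acc with
  | nil =>
    simp only [pvStepA, Option.some.injEq] at h
    subst h; simp
  | cons p rest ih =>
    by_cases h1 : pvCellA grid (p.2 + d) p.1 = some "#"
    · simp [pvStepA, h1] at h
    · by_cases h2 : pvCellA grid (p.2 + d) p.1 = some "."
      · simp only [pvStepA] at h
        rw [if_neg h1, if_neg (not_not_intro h2)] at h
        rw [ih _ h]
        simp only [List.exists_mem_cons_iff]
        rw [show pvEmitA grid d p = [] from by simp [pvEmitA, h2]]
        simp
      · simp only [pvStepA] at h
        rw [if_neg h1, if_pos h2] at h
        rw [ih _ h]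
        simp only [PySem.Set.mem_add, List.exists_mem_cons_iff]
        by_cases h3 : pvCellA grid (p.2 + d) p.1 = some "["
        · rw [show pvEmitA grid d p = [(p.1, p.2 + d), (p.1 + 1, p.2 + d)] from by
              simp [pvEmitA, h3], if_pos h3]
          simp only [List.mem_cons, List.not_mem_nil]
          tauto
        · rw [show pvEmitA grid d p = [(p.1, p.2 + d), (p.1 - 1, p.2 + d)] from by
              simp [pvEmitA, h3, h2], if_neg h3]
          simp only [List.mem_cons, List.not_mem_nil]
          tauto

lemma pvMain (grid : List (List String)) (x y d : Int)
    (hpre : (d = 1 ∨ d = -1) ∧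
      3 ≤ grid.length ∧
      (∀ row ∈ grid, row.length = (grid.getD 0 []).length) ∧
      (∀ row ∈ grid, ∀ s ∈ row, s = "#" ∨ s = "." ∨ s = "[" ∨ s = "]") ∧
      (∀ s ∈ grid.getD 0 [], s = "#") ∧
      (∀ s ∈ grid.getD (grid.length - 1) [], s = "#") ∧
      (∀ row ∈ grid, ∀ i < row.length,
          (row.getD i "" = "[" → row.getD (i + 1) "" = "]") ∧
          (row.getD i "" = "]" → 1 ≤ i ∧ row.getD (i - 1) "" = "[")) ∧
      0 ≤ x ∧ x < ((grid.getD 0 []).length : Int) ∧ 1 ≤ y ∧ y ≤ (grid.length : Int) - 2) :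
    ∀ (fuel : Nat) (newY yi : Int) (L : PySem.Set (Int × Int)) (C : PySem.Set Int),
      (C ≠ [] → 1 ≤ yi ∧ yi ≤ (grid.length : Int) - 2) →
      (∀ c ∈ C, 0 ≤ c ∧ c < ((grid.getD 0 []).length : Int)) →
      (∀ p : Int × Int, p ∈ L ↔ p.2 = yi ∧ p.1 ∈ C) →
      pvLoopA grid x y d fuel newY L =
        (match pvClimbB grid d fuel yi C with
         | none => (x, y)
         | some _ => (x, y + d)) := by
  obtain ⟨hd, hlen, hrect, halpha, htop, hbot, hpair, -, -, -, -⟩ := hpre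
  intro fuel
  induction fuel with
  | zero => intro newY yi L C _ _ _; simp [pvLoopA, pvClimbB]
  | succ fuel ih =>
    intro newY yi L C hyi hcols hmem
    by_cases hC : C = []
    · have hL : L = [] := by
        apply List.eq_nil_iff_forall_not_mem.mpr
        intro p hp
        have := (hmem p).mp hp
        simp [hC] at this
      subst hC hL
      simp [pvLoopA, pvClimbB]
    · have hL : L ≠ [] := by
        intro h0
        apply hC
        apply List.eq_nil_iff_forall_not_mem.mpr
        intro c hc
        have : (c, yi) ∈ L := (hmem (c, yi)).mpr ⟨rfl, hc⟩
        simp [h0] at this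
      obtain ⟨hyi1, hyi2⟩ := hyi hC
      have hr0 : 0 ≤ yi + d := by rcases hd with rfl | rfl <;> omega
      have hr1 : yi + d < (grid.length : Int) := by rcases hd with rfl | rfl <;> omega
      have hrow : PySem.List.pyGet? grid (yi + d) =
          some (grid[(yi + d).toNat]'(by omega)) :=
        PySem.List.pyGet?_eq_some_getElem _ hr0 hr1
      set row : List String := grid[(yi + d).toNat]'(by omega) with hrowdef
      have hrowmem : row ∈ grid := List.getElem_mem _
      have hrowlen : row.length = (grid.getD 0 []).length := hrect row hrowmem
      have hcellA : ∀ c : Int, pvCellA grid (yi + d) c = PySem.List.pyGet? row c := by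
        intro c; simp [pvCellA, hrow]
      have hget : ∀ c ∈ C, PySem.List.pyGet? row c =
          some (row.getD c.toNat "") := by
        intro c hc
        obtain ⟨hc0, hc1⟩ := hcols c hc
        rw [PySem.List.pyGet?_eq_some_getElem _ hc0 (by omega : c < (row.length : Int))]
        congr 1
        rw [List.getD_eq_getElem _ _ (by omega)]
      -- one step on both sides
      simp only [pvLoopA, pvClimbB, hrow]
      rw [if_neg hL, if_neg hC]
      by_cases hb : C.any (fun c => decide (PySem.List.pyGet? row c = some "#")) = true
      · -- blocked: both return (x, y)
        have hstep : pvStepA grid d L PySem.Set.empty = none := by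
          rw [pvStepA_none_iff]
          simp only [List.any_eq_true, decide_eq_true_eq] at hb
          obtain ⟨c, hc, hcsharp⟩ := hb
          exact ⟨(c, yi), (hmem (c, yi)).mpr ⟨rfl, hc⟩, by simpa [hcellA] using hcsharp⟩
        rw [if_pos hb, hstep]
      · -- not blocked
        have hnosharp : ∀ c ∈ C, ¬ PySem.List.pyGet? row c = some "#" := by
          intro c hc h
          exact hb (List.any_eq_true.mpr ⟨c, hc, by simp [h]⟩)
        have hstepne : pvStepA grid d L PySem.Set.empty ≠ none := by
          intro h0
          obtain ⟨p, hp, hsharp⟩ := (pvStepA_none_iff grid d L _).mp h0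
          obtain ⟨hp2, hp1⟩ := (hmem p).mp hp
          rw [hp2, hcellA] at hsharp
          exact hnosharp p.1 hp1 hsharp
        obtain ⟨L', hstep⟩ := Option.ne_none_iff_exists'.mp hstepne
        rw [if_neg hb, hstep]
        -- interior bound for the next row
        obtain ⟨c0, hc0⟩ := List.exists_mem_of_ne_nil C hC
        have hrownb : 1 ≤ yi + d ∧ yi + d ≤ (grid.length : Int) - 2 := by
          have hcell0 := hget c0 hc0
          have hmem0 : row.getD c0.toNat "" ∈ row := by
            rw [List.getD_eq_getElem]
            · exact List.getElem_mem _
            · obtain ⟨h1, h2⟩ := hcols c0 hc0; omega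
          constructor
          · rcases (by omega : yi + d = 0 ∨ 1 ≤ yi + d) with h0 | h0
            · exfalso
              have : row = grid.getD 0 [] := by
                rw [hrowdef, List.getD_eq_getElem _ _ (by omega)]
                congr 1; omega
              exact hnosharp c0 hc0 (by rw [hget c0 hc0, htop (row.getD c0.toNat "") (this ▸ hmem0)])
            · exact h0
          · rcases (by omega : yi + d = (grid.length : Int) - 1 ∨
                yi + d ≤ (grid.length : Int) - 2) with h0 | h0
            · exfalso
              have : row = grid.getD (grid.length - 1) [] := by
                rw [hrowdef, List.getD_eq_getElem _ _ (by omega)]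
                congr 1; omega
              exact hnosharp c0 hc0 (by rw [hget c0 hc0, hbot (row.getD c0.toNat "") (this ▸ hmem0)])
            · exact h0
        -- column bounds for the next column set
        have hnxtcols : ∀ c' ∈ PySem.Set.ofList (C.flatMap (pvEmitB row)),
            0 ≤ c' ∧ c' < ((grid.getD 0 []).length : Int) := by
          intro c' hc'
          rw [PySem.Set.mem_ofList, List.mem_flatMap] at hc'
          obtain ⟨c, hc, hc'mem⟩ := hc'
          obtain ⟨hcl, hcu⟩ := hcols c hc
          have hcv := hget c hc
          have hs := halpha row hrowmem (row.getD c.toNat "") (by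
            rw [List.getD_eq_getElem _ _ (by omega)]; exact List.getElem_mem _)
          have hpairc := hpair row hrowmem c.toNat (by omega)
          unfold pvEmitB at hc'mem
          rw [hcv] at hc'mem
          rcases hs with hsv | hsv | hsv | hsv
          · exact absurd (by rw [hcv, hsv]) (hnosharp c hc)
          · rw [hsv] at hc'mem
            simp at hc'mem
          · have hpr := (hpairc.1 hsv)
            have hlt : c.toNat + 1 < row.length := by
              by_contra hge
              rw [List.getD_eq_default _ _ (by omega)] at hpr
              simp at hpr
            rw [hsv] at hc'mem
            simp at hc'mem
            rcases hc'mem with rfl | rfl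
            · exact ⟨hcl, hcu⟩
            · constructor <;> omega
          · have hpr := (hpairc.2 hsv)
            rw [hsv] at hc'mem
            simp at hc'mem
            rcases hc'mem with rfl | rfl
            · exact ⟨hcl, hcu⟩
            · constructor <;> omega
        -- membership correspondence for the next layer
        have hAB : ∀ q : Int × Int, q.2 = yi →
            pvEmitA grid d q = (pvEmitB row q.1).map (fun c' => (c', yi + d)) := by
          rintro ⟨qc, qy⟩ rfl
          simp only [pvEmitA, pvEmitB, hcellA]
          split
          · simp
          · split <;> simp
        have hmem' : ∀ p : Int × Int, p ∈ L' ↔ p.2 = yi + d ∧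
            p.1 ∈ PySem.Set.ofList (C.flatMap (pvEmitB row)) := by
          intro p
          rw [pvStepA_some_mem grid d L _ L' hstep p]
          simp only [PySem.Set.mem_ofList, List.mem_flatMap, List.not_mem_nil,
            false_or, PySem.Set.empty]
          constructor
          · rintro ⟨q, hq, hpq⟩
            obtain ⟨hq2, hq1⟩ := (hmem q).mp hq
            rw [hAB q hq2, List.mem_map] at hpq
            obtain ⟨c', hc', rfl⟩ := hpq
            exact ⟨rfl, q.1, hq1, hc'⟩
          · rintro ⟨hp2, c, hc, hp1⟩
            refine ⟨(c, yi), (hmem (c, yi)).mpr ⟨rfl, hc⟩, ?_⟩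
            rw [hAB (c, yi) rfl, List.mem_map]
            exact ⟨p.1, hp1, by rw [← hp2]⟩
        exact (ih (newY + d) (yi + d) L' _ (fun _ => hrownb) hnxtcols hmem').trans
          (by cases pvClimbB grid d fuel (yi + d) (PySem.Set.ofList (C.flatMap (pvEmitB row))) <;>
            rfl)

-- ===== VERDICT (by name: the statement is the Claim_ definition above) =====
lemma pvFirstCase (grid : List (List String)) (x y d : Int)
    (h : pvPeek grid (y + d) x = some "#" ∨
      (pvPeek grid (y + d) x = some "." ∧ pvPeek grid y x ≠ none)) :
    vertical_move grid x y d = vertical_move_alt grid x y d := by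
  have hcell : ∃ row, PySem.List.pyGet? grid (y + d) = some row ∧
      (PySem.List.pyGet? row x = some "#" ∨ PySem.List.pyGet? row x = some ".") := by
    rcases h with h | ⟨h, -⟩ <;>
    · cases hr : PySem.List.pyGet? grid (y + d) with
      | none => rw [pvPeek, hr] at h; simp at h
      | some row =>
        rw [pvPeek, hr] at h
        simp only [Option.bind_some] at h
        exact ⟨row, rfl, by rw [h]; simp⟩
  obtain ⟨row, hrow, hc⟩ := hcell
  have hg : grid ≠ [] := by
    intro h0
    rw [h0] at hrow
    simp [PySem.List.pyGet?, PySem.List.pyIdx?] at hrow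
  obtain ⟨k, hk⟩ : ∃ k, grid.length = k + 1 :=
    ⟨grid.length - 1, by cases grid with | nil => exact absurd rfl hg | cons a l => simp⟩
  unfold vertical_move vertical_move_alt
  rw [hk]
  have hcellA : pvCellA grid (y + d) x = PySem.List.pyGet? row x := by
    simp [pvCellA, hrow]
  rcases hc with hc | hc
  · -- wall directly ahead: both return (x, y)
    simp [pvLoopA, pvClimbB, pvStepA, hcellA, hc, hrow, PySem.Set.ofList, PySem.Set.add,
      PySem.Set.contains, PySem.Set.empty]
  · -- free cell directly ahead: both return (x, y + d)
    simp [pvLoopA, pvClimbB, pvStepA, pvEmitB, hcellA, hc, hrow, PySem.Set.ofList,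
      PySem.Set.add, PySem.Set.contains, PySem.Set.empty]

theorem vertical_move_spec : Claim_equal_vertical_move := by
  intro grid x y d hdom hpre
  rcases hpre with hfirst | hshape
  · exact pvFirstCase grid x y d hfirst
  obtain ⟨hd, hlen, hrect, halpha, htop, hbot, hpair, hx0, hxw, hy1, hy2⟩ := hshape
  unfold Spec_vertical_move vertical_move vertical_move_alt
  refine pvMain grid x y d ⟨hd, hlen, hrect, halpha, htop, hbot, hpair, hx0, hxw, hy1, hy2⟩
    (grid.length + 1) y y _ _ ?_ ?_ ?_
  · intro _; exact ⟨hy1, hy2⟩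
  · intro c hc
    have : c = x := by simpa [PySem.Set.ofList, PySem.Set.add] using hc
    subst this
    exact ⟨hx0, hxw⟩
  · intro p
    constructor
    · intro hp
      have : p = (x, y) := by simpa [PySem.Set.ofList, PySem.Set.add] using hp
      subst this; simp [PySem.Set.ofList, PySem.Set.add]
    · rintro ⟨h2, h1⟩
      have hx : p.1 = x := by simpa [PySem.Set.ofList, PySem.Set.add] using h1
      have : p = (x, y) := Prod.ext hx h2
      subst this; simp [PySem.Set.ofList, PySem.Set.add]
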